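-- pv_equiv track=rewrite | github.com/FilipBienkowski3/PythonBasics | Zestaw1/7.py | isFibProduct
-- ===== SOURCE A (Python) =====
-- def isFibProduct(num):
--   a, b = 1, 1
--   while a * b < num:
--     a, b = b, a + b
--   if a * b == num:
--     return True
--   else:
--     return False
-- ===== SOURCE B (Python) =====
-- def isFibProduct(num):
--   # Second-order recurrence on the products themselves: p(1)=1, p(2)=2,
--   # p(n+1) = 3*p(n) - p(n-1) + s with s alternating +1/-1 (Cassini's identity),
--   # so no Fibonacci pair and no multiplication of two running values is kept.
--   if num <= 1:
--     return num == 1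
--   x, y, s = 1, 2, 1
--   while y < num:
--     x, y, s = y, 3 * y - x + s, -s
--   return y == num
-- ===== Notes on version B (the rewrite author's own statement) =====
-- stated objective: alternative
-- what changed: B drops the Fibonacci pair entirely and iterates the products of consecutive Fibonacci numbers directly via their own second-order linear recurrence with an alternating Cassini correction sign, keeping only the previous product, the current product and the sign.
import Mathlib
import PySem

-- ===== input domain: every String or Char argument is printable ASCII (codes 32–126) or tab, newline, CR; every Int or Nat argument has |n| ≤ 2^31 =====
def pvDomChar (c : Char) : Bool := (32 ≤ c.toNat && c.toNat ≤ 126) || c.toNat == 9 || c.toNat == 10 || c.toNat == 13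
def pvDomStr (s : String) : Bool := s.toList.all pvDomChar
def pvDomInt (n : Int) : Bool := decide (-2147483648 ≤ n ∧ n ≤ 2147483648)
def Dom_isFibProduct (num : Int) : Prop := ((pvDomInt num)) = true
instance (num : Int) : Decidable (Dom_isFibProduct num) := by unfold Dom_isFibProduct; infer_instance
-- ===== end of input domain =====

-- B iterates the products of consecutive Fibonacci numbers directly, via the
-- second-order recurrence p(n+1) = 3*p(n) - p(n-1) ± 1, instead of A's Fibonacci pair.

-- ===== PORT A =====
-- the while loop of A: advance (a,b) while a*b < num.  The fuel num.toNat is only a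
-- totality guard: the product grows by at least 1 per step from (1,1), so the loop
-- condition is already false whenever the fuel runs out.
def isFibProductLoop (fuel : Nat) (num a b : Int) : Int × Int :=
  match fuel with
  | 0 => (a, b)
  | fuel + 1 => if a * b < num then isFibProductLoop fuel num b (a + b) else (a, b)

def isFibProduct (num : Int) : Bool :=
  let p := isFibProductLoop num.toNat num 1 1
  if p.1 * p.2 == num then true else false

-- ===== PORT B =====
-- the while loop of B: x, y previous/current product, s alternating Cassini sign.
-- Fuel num.toNat is again only a totality guard: y grows by at least 2 per step from (1,2,1).
def isFibProductAltLoop (fuel : Nat) (num x y s : Int) : Bool :=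
  match fuel with
  | 0 => y == num
  | fuel + 1 =>
    if y < num then isFibProductAltLoop fuel num y (3 * y - x + s) (-s) else y == num

def isFibProduct_alt (num : Int) : Bool :=
  if num ≤ 1 then num == 1
  else isFibProductAltLoop num.toNat num 1 2 1

-- ===== PRECONDITION & SPEC =====
def Spec_isFibProduct (num : Int) (out : Bool) : Prop := out = isFibProduct_alt num
instance (num : Int) (out : Bool) : Decidable (Spec_isFibProduct num out) := by unfold Spec_isFibProduct; infer_instance

-- ===== CLAIM (what is proved, stated in full; the proofs are below) =====
def Claim_equal_isFibProduct : Prop := ∀ (num : Int), Dom_isFibProduct num → Spec_isFibProduct num (isFibProduct num)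

-- ===== LEMMAS AND PROOFS =====

-- invariant linking B's state to A's Fibonacci pair (a,b):
-- x = a*(b-a) (previous product), y = a*b (current product), s = b² - ab - a² (Cassini sign);
-- both fuels are large enough that neither loop runs dry before its condition fails.
lemma loops_agree (j : Nat) : ∀ (k : Nat) (num a b x y s : Int), 1 ≤ a → a < b →
    x = a * (b - a) → y = a * b → s = b * b - a * b - a * a →
    (num - y).toNat < j → (num - a * b).toNat < k →
    isFibProductAltLoop j num x y s =
      ((isFibProductLoop k num a b).1 * (isFibProductLoop k num a b).2 == num) := by
  induction j with
  | zero => intro k num a b x y s _ _ _ _ _ hj _; omega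
  | succ j ih =>
    intro k num a b x y s ha hab hix hiy his hj hk
    obtain ⟨k', rfl⟩ : ∃ k', k = k' + 1 := ⟨k - 1, by omega⟩
    show (if y < num then isFibProductAltLoop j num y (3 * y - x + s) (-s) else y == num) = _
    show _ = ((if a * b < num then isFibProductLoop k' num b (a + b) else (a, b)).1 *
              (if a * b < num then isFibProductLoop k' num b (a + b) else (a, b)).2 == num)
    by_cases h : y < num
    · have hab' : a * b < num := by omega
      rw [if_pos h, if_pos hab']
      apply ih
      · omega
      · nlinarith
      · subst hix hiy his; ring
      · subst hix hiy his; ring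
      · subst hix hiy his; ring
      · -- the next product is y + b² and b ≥ 2, so y grows by at least 4
        have he : 3 * y - x + s = a * b + b * b := by subst hix hiy his; ring
        have hb4 : 4 ≤ b * b := by nlinarith
        omega
      · have h1 : 1 ≤ b := by omega
        have h2 : a * b < b * (a + b) := by nlinarith
        omega
    · have hnab : ¬ a * b < num := by omega
      rw [if_neg h, if_neg hnab]
      rw [hiy]

-- ===== VERDICT (by name: the statement is the Claim_ definition above) =====
theorem isFibProduct_spec : Claim_equal_isFibProduct := by
  intro num _
  unfold Spec_isFibProduct isFibProduct isFibProduct_alt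
  by_cases hle : num ≤ 1
  · rw [if_pos hle]
    rcases (by omega : num ≤ 0 ∨ num = 1) with h0 | h1
    · have : num.toNat = 0 := by omega
      rw [this]
      show (if ((1 * 1 : Int) == num) = true then true else false) = (num == 1)
      have l : ((1 * 1 : Int) == num) = false := by simp; omega
      have r : (num == 1) = false := by simp; omega
      rw [l, r]; simp
    · subst h1; decide
  · rw [if_neg hle]
    obtain ⟨m, hm⟩ : ∃ m, num.toNat = m + 1 := ⟨num.toNat - 1, by omega⟩
    rw [hm]
    show (if ((isFibProductLoop (m+1) num 1 1).1 * (isFibProductLoop (m+1) num 1 1).2 == num) = true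
          then true else false) = _
    have hstep : isFibProductLoop (m + 1) num 1 1 = isFibProductLoop m num 1 2 := by
      show (if (1 * 1 : Int) < num then isFibProductLoop m num 1 (1 + 1) else ((1:Int), (1:Int)))
            = isFibProductLoop m num 1 2
      rw [if_pos (by omega)]; norm_num
    rw [hstep, ← hm]
    rw [← loops_agree num.toNat m num 1 2 1 2 1 (by norm_num) (by norm_num)
      (by ring) (by ring) (by ring) (by omega) (by omega)]
    by_cases h : isFibProductAltLoop num.toNat num 1 2 1 <;> simp [h]
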